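-- pv_equiv track=rewrite | github.com/agral/CompetitiveProgramming | LeetCode/2615/python/lc2615.py | distance_naive
-- ===== SOURCE A (Python) =====
-- from typing import List
--
-- def distance_naive(nums: List[int]) -> List[int]:
--     value_to_index = {}
--     # sweep #1: map individual numbers to the indices they appear at in `nums`:
--     for idx, value in enumerate(nums):
--         if value not in value_to_index:
--             value_to_index[value] = [idx]
--         else:
--             value_to_index[value].append(idx)
--
--     # sweep #2: calculate the actual distance for each entry in `nums`:
--     ans = [0] * len(nums)
--     for idx, value in enumerate(nums):
--         for other_idx in value_to_index[value]:
--             ans[idx] += abs(idx - other_idx)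
--
--     return ans
-- ===== SOURCE B (Python) =====
-- from typing import List
--
-- def distance_naive(nums: List[int]) -> List[int]:
--     # One pass totals, one pass running prefix: O(n) instead of O(n^2).
--     totals = {}
--     for i, v in enumerate(nums):
--         c, s = totals.get(v, (0, 0))
--         totals[v] = (c + 1, s + i)
--     seen = {}
--     ans = []
--     for i, v in enumerate(nums):
--         cl, sl = seen.get(v, (0, 0))
--         ct, st = totals.get(v, (0, 0))
--         ans.append(cl * i - sl + (st - sl - i) - (ct - cl - 1) * i)
--         seen[v] = (cl + 1, sl + i)
--     return ans
-- ===== Notes on version B (the rewrite author's own statement) =====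
-- stated objective: faster
-- what changed: Replaced the per-index scan over the full occurrence list of each value (quadratic on duplicate-heavy inputs) by per-value (count, index-sum) totals plus a running prefix dict, computing each absolute-distance sum in O(1) by the prefix-sum formula.
import Mathlib
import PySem

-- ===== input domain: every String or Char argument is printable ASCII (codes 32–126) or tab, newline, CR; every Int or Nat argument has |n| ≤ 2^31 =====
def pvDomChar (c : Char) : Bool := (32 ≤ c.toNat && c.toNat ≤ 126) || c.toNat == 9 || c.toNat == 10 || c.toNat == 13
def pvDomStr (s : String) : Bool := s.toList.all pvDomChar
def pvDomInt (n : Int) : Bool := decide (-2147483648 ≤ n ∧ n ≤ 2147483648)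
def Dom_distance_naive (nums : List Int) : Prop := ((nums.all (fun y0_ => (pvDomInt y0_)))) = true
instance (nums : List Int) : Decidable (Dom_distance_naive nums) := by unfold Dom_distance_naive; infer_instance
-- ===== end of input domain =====

-- B replaces A's per-index scan over each value's full occurrence list by per-value (count, index-sum)
-- totals plus a running prefix dict, computing each answer in O(1) (objective: faster, asymptotic).

-- ===== PORT A =====
def distance_naive (nums : List Int) : List Int :=
  -- sweep #1: map individual numbers to the indices they appear at in `nums`
  let value_to_index : PySem.Dict Int (List Int) :=
    (PySem.List.enumerate nums).foldl
      (fun d p =>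
        if d.contains p.2 = false then d.insert p.2 [p.1]
        else d.modify p.2 [] (fun l => l ++ [p.1]))
      PySem.Dict.empty
  -- sweep #2: calculate the actual distance for each entry in `nums`
  (PySem.List.enumerate nums).foldl
    (fun ans p =>
      (value_to_index.getD p.2 []).foldl
        (fun a other => PySem.List.pySetD a p.1 (PySem.List.pyGetD a p.1 0 + |p.1 - other|))
        ans)
    (PySem.List.pyRepeat [(0 : Int)] (nums.length : Int))

-- ===== PORT B =====
def distance_naive_alt (nums : List Int) : List Int :=
  -- pass #1: per value, totals (count, sum of indices)
  let totals : PySem.Dict Int (Int × Int) :=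
    (PySem.List.enumerate nums).foldl
      (fun d p => d.insert p.2 ((d.getD p.2 (0, 0)).1 + 1, (d.getD p.2 (0, 0)).2 + p.1))
      PySem.Dict.empty
  -- pass #2: running prefix (count, sum) per value; prefix-sum formula per index
  let r :=
    (PySem.List.enumerate nums).foldl
      (fun (st : PySem.Dict Int (Int × Int) × List Int) p =>
        let cs := st.1.getD p.2 (0, 0)
        let ts := totals.getD p.2 (0, 0)
        (st.1.insert p.2 (cs.1 + 1, cs.2 + p.1),
         st.2 ++ [cs.1 * p.1 - cs.2 + (ts.2 - cs.2 - p.1) - (ts.1 - cs.1 - 1) * p.1]))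
      (PySem.Dict.empty, ([] : List Int))
  r.2

-- ===== PRECONDITION & SPEC =====
def Spec_distance_naive (nums : List Int) (out : List Int) : Prop := out = distance_naive_alt nums
instance (nums : List Int) (out : List Int) : Decidable (Spec_distance_naive nums out) := by unfold Spec_distance_naive; infer_instance

-- ===== CLAIM (what is proved, stated in full; the proofs are below) =====
def Claim_equal_distance_naive : Prop := ∀ (nums : List Int), Dom_distance_naive nums → Spec_distance_naive nums (distance_naive nums)

-- ===== LEMMAS AND PROOFS =====

-- occurrence indices of value v in an (index, value) list, their count and sum
def pvOcc (l : List (Int × Int)) (v : Int) : List Int := (l.filter (fun p => p.2 == v)).map (·.1)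
def pvCnt (l : List (Int × Int)) (v : Int) : Int := ((l.filter (fun p => p.2 == v)).length : Int)
def pvSm (l : List (Int × Int)) (v : Int) : Int := pvOcc l v |>.sum
def pvInner (i : Int) (g : List Int) : Int := (g.map (fun j => |i - j|)).sum

-- B's output described denotationally: one element per entry, from prefix and total (count, sum)
def pvBOut (l : List (Int × Int)) : List (Int × Int) → List (Int × Int) → List Int
  | _, [] => []
  | pre, p :: rest =>
      (pvCnt pre p.2 * p.1 - pvSm pre p.2 + (pvSm l p.2 - pvSm pre p.2 - p.1)
        - (pvCnt l p.2 - pvCnt pre p.2 - 1) * p.1)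
      :: pvBOut l (pre ++ [p]) rest

-- A's grouping dict: getD returns the matching indices, in order
theorem pvDictA (l : List (Int × Int)) (d : PySem.Dict Int (List Int)) (v : Int) :
    ((l.foldl
      (fun d p =>
        if d.contains p.2 = false then d.insert p.2 [p.1]
        else d.modify p.2 [] (fun l => l ++ [p.1])) d).getD v [])
    = d.getD v [] ++ pvOcc l v := by
  induction l generalizing d with
  | nil => simp [pvOcc]
  | cons p t ih =>
    simp only [List.foldl_cons, ih]
    by_cases hc : d.contains p.2 = false
    · simp only [hc, if_true]
      rw [PySem.Dict.getD_insert]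
      by_cases hv : v = p.2
      · subst hv
        rw [PySem.Dict.getD_of_not_contains (d := d) (k := p.2) (d0 := ([] : List Int)) hc]
        simp [pvOcc]
      · have hv' : ¬ (p.2 = v) := fun h => hv h.symm
        simp [hv, pvOcc, hv']
    · have hc' : d.contains p.2 = true := by simpa using hc
      simp only [hc', Bool.true_eq_false, if_false]
      rw [PySem.Dict.getD_modify]
      by_cases hv : v = p.2
      · subst hv; simp [pvOcc]
      · have hv' : ¬ (p.2 = v) := fun h => hv h.symm
        simp [hv, pvOcc, hv']

-- B's totals/seen dict: getD returns (count, sum of indices) of the processed entries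
theorem pvDictT (l : List (Int × Int)) (d : PySem.Dict Int (Int × Int)) (v : Int) :
    ((l.foldl
      (fun d p => d.insert p.2 ((d.getD p.2 (0, 0)).1 + 1, (d.getD p.2 (0, 0)).2 + p.1)) d).getD v (0, 0))
    = ((d.getD v (0, 0)).1 + pvCnt l v, (d.getD v (0, 0)).2 + pvSm l v) := by
  induction l generalizing d with
  | nil => simp [pvCnt, pvSm, pvOcc]
  | cons p t ih =>
    simp only [List.foldl_cons, ih]
    rw [PySem.Dict.getD_insert]
    by_cases hv : v = p.2
    · subst hv
      simp [pvCnt, pvSm, pvOcc]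
      constructor <;> ring
    · have hv' : ¬ (p.2 = v) := fun h => hv h.symm
      simp [hv, pvCnt, pvSm, pvOcc, hv']

theorem pvSeedGetD (pre : List (Int × Int)) (v : Int) :
    ((pre.foldl
      (fun d p => d.insert p.2 ((d.getD p.2 (0, 0)).1 + 1, (d.getD p.2 (0, 0)).2 + p.1))
      PySem.Dict.empty).getD v (0, 0)) = (pvCnt pre v, pvSm pre v) := by
  rw [pvDictT]; simp [PySem.Dict.getD_empty]

-- A's inner loop over a group: one accumulated set at cell i
theorem pvInnerLoop (g : List Int) (ans : List Int) (i : Int) (h0 : 0 ≤ i) (h : i.toNat < ans.length) :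
    g.foldl (fun a other => PySem.List.pySetD a i (PySem.List.pyGetD a i 0 + |i - other|)) ans
    = ans.set i.toNat (ans.getD i.toNat 0 + pvInner i g) := by
  induction g generalizing ans with
  | nil =>
    simp only [List.foldl_nil, pvInner, List.map_nil, List.sum_nil, add_zero]
    rw [List.getD_eq_getElem _ _ h, List.set_getElem_self]
  | cons j t ih =>
    simp only [List.foldl_cons]
    rw [PySem.List.pySetD_of_nonneg _ _ h0, PySem.List.pyGetD_of_nonneg _ _ h0]
    rw [ih (ans.set i.toNat (ans.getD i.toNat 0 + |i - j|)) (by simpa using h)]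
    rw [List.set_set]
    congr 1
    rw [List.getD_eq_getElem _ _ (by simpa using h), List.getElem_set_self]
    · simp [pvInner]; ring

-- A's outer loop fills the zero cells left to right
theorem pvOuterLoop (G : Int → List Int) (xs : List Int) (done : List Int) :
    (PySem.List.enumerate xs (done.length : Int)).foldl
      (fun ans p =>
        (G p.2).foldl (fun a other => PySem.List.pySetD a p.1 (PySem.List.pyGetD a p.1 0 + |p.1 - other|)) ans)
      (done ++ List.replicate xs.length 0)
    = done ++ (PySem.List.enumerate xs (done.length : Int)).map (fun p => pvInner p.1 (G p.2)) := by
  induction xs generalizing done with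
  | nil => simp
  | cons x xs ih =>
    rw [PySem.List.enumerate_cons]
    simp only [List.foldl_cons, List.map_cons]
    have hrep : List.replicate (x :: xs).length (0 : Int) = 0 :: List.replicate xs.length 0 := by
      simp [List.replicate]
    rw [hrep]
    have hlen : ((done.length : Int)).toNat = done.length := by simp
    rw [pvInnerLoop (G x) _ _ (by positivity) (by simp [hlen])]
    have hgetD : (done ++ 0 :: List.replicate xs.length 0).getD ((done.length : Int)).toNat 0 = 0 := by
      rw [hlen]; simp [List.getD_eq_getElem?_getD]
    have hset : (done ++ 0 :: List.replicate xs.length 0).set ((done.length : Int)).toNat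
        (((done ++ 0 :: List.replicate xs.length 0).getD ((done.length : Int)).toNat 0) + pvInner (done.length : Int) (G x))
        = (done ++ [pvInner (done.length : Int) (G x)]) ++ List.replicate xs.length 0 := by
      rw [hgetD, hlen, zero_add]
      rw [List.set_append_right _ _ (le_refl _)]
      simp
    rw [hset]
    have := ih (done ++ [pvInner (done.length : Int) (G x)])
    simp only [List.length_append, List.length_cons, List.length_nil, Nat.cast_add, Nat.cast_one,
      zero_add] at this ⊢
    rw [this]
    simp

-- B's main loop, with the seen dict seeded by an arbitrary processed prefix
theorem pvAltLoop (e : List (Int × Int)) (l pre : List (Int × Int)) (acc : List Int) :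
    ((l.foldl
      (fun (st : PySem.Dict Int (Int × Int) × List Int) p =>
        (st.1.insert p.2 ((st.1.getD p.2 (0, 0)).1 + 1, (st.1.getD p.2 (0, 0)).2 + p.1),
         st.2 ++ [(st.1.getD p.2 (0, 0)).1 * p.1 - (st.1.getD p.2 (0, 0)).2
           + (((e.foldl (fun d p => d.insert p.2 ((d.getD p.2 (0, 0)).1 + 1, (d.getD p.2 (0, 0)).2 + p.1)) (PySem.Dict.empty : PySem.Dict Int (Int × Int))).getD p.2 (0, 0)).2 - (st.1.getD p.2 (0, 0)).2 - p.1)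
           - (((e.foldl (fun d p => d.insert p.2 ((d.getD p.2 (0, 0)).1 + 1, (d.getD p.2 (0, 0)).2 + p.1)) (PySem.Dict.empty : PySem.Dict Int (Int × Int))).getD p.2 (0, 0)).1 - (st.1.getD p.2 (0, 0)).1 - 1) * p.1]))
      ((pre.foldl (fun d p => d.insert p.2 ((d.getD p.2 (0, 0)).1 + 1, (d.getD p.2 (0, 0)).2 + p.1)) PySem.Dict.empty), acc)).2)
    = acc ++ pvBOut e pre l := by
  induction l generalizing pre acc with
  | nil => simp [pvBOut]
  | cons p t ih =>
    simp only [List.foldl_cons]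
    have hseed : ∀ v, ((pre.foldl
        (fun d p => d.insert p.2 ((d.getD p.2 (0, 0)).1 + 1, (d.getD p.2 (0, 0)).2 + p.1))
        PySem.Dict.empty).getD v (0, 0)) = (pvCnt pre v, pvSm pre v) := pvSeedGetD pre
    have hstep : (pre.foldl
        (fun d p => d.insert p.2 ((d.getD p.2 (0, 0)).1 + 1, (d.getD p.2 (0, 0)).2 + p.1))
        PySem.Dict.empty).insert p.2
          (((pre.foldl (fun d p => d.insert p.2 ((d.getD p.2 (0, 0)).1 + 1, (d.getD p.2 (0, 0)).2 + p.1)) (PySem.Dict.empty : PySem.Dict Int (Int × Int))).getD p.2 (0, 0)).1 + 1,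
           ((pre.foldl (fun d p => d.insert p.2 ((d.getD p.2 (0, 0)).1 + 1, (d.getD p.2 (0, 0)).2 + p.1)) (PySem.Dict.empty : PySem.Dict Int (Int × Int))).getD p.2 (0, 0)).2 + p.1)
        = ((pre ++ [p]).foldl
        (fun d p => d.insert p.2 ((d.getD p.2 (0, 0)).1 + 1, (d.getD p.2 (0, 0)).2 + p.1))
        PySem.Dict.empty) := by
      rw [List.foldl_append]; simp
    rw [hstep, ih]
    simp [hseed, pvSeedGetD, pvBOut]

-- per-index absolute-distance sums over a list all below / all above i
theorem pvInnerLe (i : Int) (g : List Int) (h : ∀ j ∈ g, j ≤ i) :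
    pvInner i g = (g.length : Int) * i - g.sum := by
  induction g with
  | nil => simp [pvInner]
  | cons j t ih =>
    have hj : j ≤ i := h j (by simp)
    have := ih (fun x hx => h x (by simp [hx]))
    simp only [pvInner, List.map_cons, List.sum_cons] at this ⊢
    rw [abs_of_nonneg (by omega), this]
    simp only [List.length_cons]
    push_cast
    ring

theorem pvInnerGe (i : Int) (g : List Int) (h : ∀ j ∈ g, i ≤ j) :
    pvInner i g = g.sum - (g.length : Int) * i := by
  induction g with
  | nil => simp [pvInner]
  | cons j t ih =>
    have hj : i ≤ j := h j (by simp)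
    have := ih (fun x hx => h x (by simp [hx]))
    simp only [pvInner, List.map_cons, List.sum_cons] at this ⊢
    rw [abs_of_nonpos (by omega), this]
    simp only [List.length_cons]
    push_cast
    ring

-- the heart: A's per-index sum equals B's prefix-sum formula, entry by entry
theorem pvMain (e : List (Int × Int)) (he : e.Pairwise (fun p q => p.1 < q.1)) :
    ∀ (rest pre : List (Int × Int)), e = pre ++ rest →
      rest.map (fun p => pvInner p.1 (pvOcc e p.2)) = pvBOut e pre rest := by
  intro rest
  induction rest with
  | nil => intro pre h; simp [pvBOut]
  | cons p t ih =>
    intro pre h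
    subst h
    have hpw := he
    rw [List.pairwise_append] at hpw
    have hpre : ∀ a ∈ pre, a.1 < p.1 := fun a ha => hpw.2.2 a ha p (by simp)
    have ht : ∀ b ∈ t, p.1 < b.1 := by
      have := hpw.2.1
      rw [List.pairwise_cons] at this
      exact this.1
    have hocc : pvOcc (pre ++ p :: t) p.2 = pvOcc pre p.2 ++ p.1 :: pvOcc t p.2 := by
      simp [pvOcc, List.filter_append]
    have hcnt : pvCnt (pre ++ p :: t) p.2 = pvCnt pre p.2 + 1 + pvCnt t p.2 := by
      simp [pvCnt, List.filter_append]; ring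
    have hsm : pvSm (pre ++ p :: t) p.2 = pvSm pre p.2 + p.1 + pvSm t p.2 := by
      simp [pvSm, hocc]; ring
    have hL1 : pvInner p.1 (pvOcc pre p.2) = pvCnt pre p.2 * p.1 - pvSm pre p.2 := by
      rw [pvInnerLe]
      · simp [pvOcc, pvCnt, pvSm]
      · intro j hj
        simp only [pvOcc, List.mem_map] at hj
        obtain ⟨a, ha, rfl⟩ := hj
        exact le_of_lt (hpre a (List.mem_of_mem_filter ha))
    have hL2 : pvInner p.1 (pvOcc t p.2) = pvSm t p.2 - pvCnt t p.2 * p.1 := by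
      rw [pvInnerGe]
      · simp [pvOcc, pvCnt, pvSm]
      · intro j hj
        simp only [pvOcc, List.mem_map] at hj
        obtain ⟨a, ha, rfl⟩ := hj
        exact le_of_lt (ht a (List.mem_of_mem_filter ha))
    simp only [List.map_cons, pvBOut]
    congr 1
    · rw [hocc]
      have hsplit : pvInner p.1 (pvOcc pre p.2 ++ p.1 :: pvOcc t p.2)
           = pvInner p.1 (pvOcc pre p.2) + pvInner p.1 (pvOcc t p.2) := by
        simp [pvInner, List.map_append]
      rw [hsplit, hL1, hL2, hcnt, hsm]
      ring
    · exact ih (pre ++ [p]) (by simp)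

-- ===== VERDICT (by name: the statement is the Claim_ definition above) =====
theorem distance_naive_spec : Claim_equal_distance_naive := by
  intro nums _
  show distance_naive nums = distance_naive_alt nums
  simp only [distance_naive, distance_naive_alt]
  have hB := pvAltLoop (PySem.List.enumerate nums) (PySem.List.enumerate nums) [] []
  simp only [List.foldl_nil, List.nil_append] at hB
  rw [hB]
  have hA := pvOuterLoop
    (fun v => ((PySem.List.enumerate nums).foldl
      (fun d p =>
        if d.contains p.2 = false then d.insert p.2 [p.1]
        else d.modify p.2 [] (fun l => l ++ [p.1])) PySem.Dict.empty).getD v []) nums []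
  simp only [List.length_nil, Nat.cast_zero, List.nil_append] at hA
  rw [PySem.List.pyRepeat_singleton]
  simp only [Int.toNat_natCast]
  rw [hA]
  simp only [pvDictA, PySem.Dict.getD_empty, List.nil_append]
  exact pvMain (PySem.List.enumerate nums) (PySem.List.pairwise_lt_enumerate nums 0)
    (PySem.List.enumerate nums) [] rfl
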